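-- pv_equiv track=rewrite | github.com/talesitf/talesitf.github.io | summarizeDonations.py | detect_value_column
-- ===== SOURCE A (Python) =====
-- from typing import List, Optional, Sequence, Tuple
--
-- def detect_value_column(fieldnames: Sequence[str]) -> Optional[str]:
--     if not fieldnames:
--         return None
--     # Preferências comuns em exports do Nubank
--     candidates = [
--         "valor",
--         "valor (r$)",
--         "valor r$",
--         "amount",
--     ]
--     lower_map = {fn: (fn or "").strip().lower() for fn in fieldnames}
--     for pref in candidates:
--         for original, lower in lower_map.items():
--             if lower == pref:
--                 return original
--     # fallback: qualquer coluna que contenha 'valor'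
--     for original, lower in lower_map.items():
--         if "valor" in lower:
--             return original
--     return None
-- ===== SOURCE B (Python) =====
-- def _rank(low, candidates):
--     if low in candidates:
--         return candidates.index(low)
--     if "valor" in low:
--         return 4
--     return 5
--
-- def detect_value_column(fieldnames):
--     candidates = ["valor", "valor (r$)", "valor r$", "amount"]
--     best_rank = 5
--     best = None
--     for fn in fieldnames:
--         r = _rank(fn.strip().lower(), candidates)
--         if r < best_rank:
--             best_rank, best = r, fn
--     return best
-- ===== Notes on version B (the rewrite author's own statement) =====
-- stated objective: alternative
-- what changed: A builds a dict of lowered names and then makes up to five separate scans (one per candidate plus a contains-'valor' fallback); B makes a single pass over the fieldnames keeping the first fieldname of minimal rank (candidate index 0..3, contains-'valor' = 4).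
import Mathlib
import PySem

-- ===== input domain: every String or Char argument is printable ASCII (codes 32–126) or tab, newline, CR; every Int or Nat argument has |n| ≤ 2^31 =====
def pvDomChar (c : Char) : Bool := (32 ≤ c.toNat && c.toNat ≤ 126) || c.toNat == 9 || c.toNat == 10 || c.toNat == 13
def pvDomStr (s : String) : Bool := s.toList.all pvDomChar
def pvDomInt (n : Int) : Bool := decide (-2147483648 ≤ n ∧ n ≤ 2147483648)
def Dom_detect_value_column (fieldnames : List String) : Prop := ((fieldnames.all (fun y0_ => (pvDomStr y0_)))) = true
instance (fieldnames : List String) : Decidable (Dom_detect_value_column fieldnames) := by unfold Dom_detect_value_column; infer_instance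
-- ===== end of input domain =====

-- B replaces A's dict comprehension plus three scans by one pass that keeps the best-ranked
-- fieldname (exact-match index 0..3, contains-'valor' = 4), first-seen on ties (objective: alternative).

-- ===== PORT A =====
-- fn.strip().lower() ('fn or ""' equals fn for strings)
def pvLower (fn : String) : String := PySem.Str.lower (PySem.Str.strip fn)

-- 'for pref in candidates: for original, lower in lower_map.items(): if lower == pref: return original'
def pvPrefLoop (cands : List String) (items : List (String × String)) : Option String :=
  match cands with
  | [] => none
  | pref :: rest =>
    match items.find? (fun p => p.2 == pref) with
    | some p => some p.1
    | none => pvPrefLoop rest items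

def detect_value_column (fieldnames : List String) : Option String :=
  if fieldnames.isEmpty then none
  else
    let candidates : List String := ["valor", "valor (r$)", "valor r$", "amount"]
    let lower_map : PySem.Dict String String :=
      fieldnames.foldl (fun d fn => d.insert fn (pvLower fn)) PySem.Dict.empty
    match pvPrefLoop candidates lower_map.items with
    | some r => some r
    | none =>
      -- fallback: first column whose lowered name contains 'valor'
      match lower_map.items.find? (fun p => PySem.Str.isIn "valor" p.2) with
      | some p => some p.1
      | none => none

-- ===== PORT B =====
def pvRank (low : String) (candidates : List String) : Nat :=
  match PySem.List.index? candidates low with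
  | some i => i
  | none => if PySem.Str.isIn "valor" low then 4 else 5

def detect_value_column_alt (fieldnames : List String) : Option String :=
  let candidates : List String := ["valor", "valor (r$)", "valor r$", "amount"]
  (fieldnames.foldl (fun (st : Nat × Option String) fn =>
      let r := pvRank (pvLower fn) candidates
      if r < st.1 then (r, some fn) else st) (5, none)).2

-- ===== PRECONDITION & SPEC =====
def Spec_detect_value_column (fieldnames : List String) (out : Option String) : Prop := out = detect_value_column_alt fieldnames
instance (fieldnames : List String) (out : Option String) : Decidable (Spec_detect_value_column fieldnames out) := by unfold Spec_detect_value_column; infer_instance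

-- ===== CLAIM (what is proved, stated in full; the proofs are below) =====
def Claim_equal_detect_value_column : Prop := ∀ (fieldnames : List String), Dom_detect_value_column fieldnames → Spec_detect_value_column fieldnames (detect_value_column fieldnames)

-- ===== LEMMAS AND PROOFS =====

-- B's rank of a fieldname (5 = never selected)
def pvRk (x : String) : Nat := pvRank (pvLower x) ["valor", "valor (r$)", "valor r$", "amount"]

theorem pvIdx4 (s : String) :
    PySem.List.index? ["valor", "valor (r$)", "valor r$", "amount"] s =
      if s = "valor" then some 0 else if s = "valor (r$)" then some 1
      else if s = "valor r$" then some 2 else if s = "amount" then some 3 else none := by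
  by_cases h0 : s = "valor"
  · subst h0; rw [PySem.List.index?_cons_self, if_pos rfl]
  · rw [PySem.List.index?_cons_of_ne _ (Ne.symm h0), if_neg h0]
    by_cases h1 : s = "valor (r$)"
    · subst h1; rw [PySem.List.index?_cons_self, if_pos rfl]; rfl
    · rw [PySem.List.index?_cons_of_ne _ (Ne.symm h1), if_neg h1]
      by_cases h2 : s = "valor r$"
      · subst h2; rw [PySem.List.index?_cons_self, if_pos rfl]; rfl
      · rw [PySem.List.index?_cons_of_ne _ (Ne.symm h2), if_neg h2]
        by_cases h3 : s = "amount"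
        · subst h3; rw [PySem.List.index?_cons_self, if_pos rfl]; rfl
        · rw [PySem.List.index?_cons_of_ne _ (Ne.symm h3), if_neg h3]
          simp [PySem.List.index?_eq_idxOf?]

theorem pvRk_eq (x : String) : pvRk x =
    if pvLower x = "valor" then 0
    else if pvLower x = "valor (r$)" then 1
    else if pvLower x = "valor r$" then 2
    else if pvLower x = "amount" then 3
    else if PySem.Str.isIn "valor" (pvLower x) then 4 else 5 := by
  unfold pvRk pvRank
  rw [pvIdx4]
  split_ifs <;> rfl

theorem pvRk_le (x : String) : pvRk x ≤ 5 := by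
  rw [pvRk_eq]; split_ifs <;> omega

-- minimal rank present in a list (5 if none below 5)
def pvMrk (l : List String) : Nat := l.foldr (fun x a => min (pvRk x) a) 5

theorem pvMrk_cons (x : String) (t : List String) : pvMrk (x :: t) = min (pvRk x) (pvMrk t) := rfl

theorem pvMrk_le (l : List String) : pvMrk l ≤ 5 := by
  induction l with
  | nil => simp [pvMrk]
  | cons x t ih => rw [pvMrk_cons]; omega

theorem pvMrk_le_of_mem {l : List String} {x : String} (h : x ∈ l) : pvMrk l ≤ pvRk x := by
  induction l with
  | nil => simp at h
  | cons y t ih =>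
    simp only [List.mem_cons] at h
    rw [pvMrk_cons]
    rcases h with rfl | h
    · omega
    · have := ih h; omega

theorem pvMrk_mem (l : List String) : pvMrk l = 5 ∨ ∃ x ∈ l, pvRk x = pvMrk l := by
  induction l with
  | nil => exact Or.inl rfl
  | cons y t ih =>
    rw [pvMrk_cons]
    rcases Nat.le_total (pvRk y) (pvMrk t) with h | h
    · right; exact ⟨y, List.mem_cons_self, by omega⟩
    · rcases ih with h5 | ⟨x, hx, hxe⟩
      · left; have := pvRk_le y; omega
      · right; exact ⟨x, List.mem_cons_of_mem _ hx, by omega⟩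

-- the single pass keeps the first element of minimal rank
theorem pvFold_char (l : List String) : ∀ (b : Nat) (acc : Option String), b ≤ 5 →
    l.foldl (fun (st : Nat × Option String) fn =>
        if pvRk fn < st.1 then (pvRk fn, some fn) else st) (b, acc) =
      (min b (pvMrk l),
       if min b (pvMrk l) < b then l.find? (fun x => pvRk x == min b (pvMrk l)) else acc) := by
  induction l with
  | nil =>
    intro b acc hb
    have h5 : pvMrk ([] : List String) = 5 := rfl
    rw [List.foldl_nil, h5, Nat.min_eq_left hb, if_neg (lt_irrefl b)]
  | cons x t ih =>
    intro b acc hb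
    have hm := pvMrk_cons x t
    have hmt := pvMrk_le t
    simp only [List.foldl]
    by_cases hx : pvRk x < b
    · rw [if_pos hx, ih (pvRk x) (some x) (pvRk_le x)]
      have hM : min b (pvMrk (x :: t)) = min (pvRk x) (pvMrk t) := by rw [hm]; omega
      rw [hM]
      by_cases he : min (pvRk x) (pvMrk t) < pvRk x
      · rw [if_pos he, if_pos (by omega),
          List.find?_cons_of_neg (by simp only [beq_iff_eq]; omega)]
      · rw [if_neg he, if_pos (by omega),
          List.find?_cons_of_pos (by simp only [beq_iff_eq]; omega)]
    · rw [if_neg hx, ih b acc hb]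
      have hM : min b (pvMrk (x :: t)) = min b (pvMrk t) := by rw [hm]; omega
      rw [hM]
      by_cases he : min b (pvMrk t) < b
      · rw [if_pos he, if_pos he,
          List.find?_cons_of_neg (by simp only [beq_iff_eq]; omega)]
      · rw [if_neg he, if_neg he]

theorem pvAlt_char (l : List String) : detect_value_column_alt l =
    if pvMrk l < 5 then l.find? (fun x => pvRk x == pvMrk l) else none := by
  have hf : (fun (st : Nat × Option String) fn =>
      let r := pvRank (pvLower fn) ["valor", "valor (r$)", "valor r$", "amount"]
      if r < st.1 then (r, some fn) else st) =
      (fun (st : Nat × Option String) fn => if pvRk fn < st.1 then (pvRk fn, some fn) else st) := by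
    funext st fn
    rfl
  show (l.foldl (fun (st : Nat × Option String) fn =>
      let r := pvRank (pvLower fn) ["valor", "valor (r$)", "valor r$", "amount"]
      if r < st.1 then (r, some fn) else st) (5, none)).2 = _
  rw [hf, pvFold_char l 5 none (by omega), Nat.min_eq_right (pvMrk_le l)]

-- the dict comprehension: items are the deduplicated fieldnames paired with their lowered forms
def pvBuild (l : List String) : PySem.Dict String String :=
  l.foldl (fun d fn => d.insert fn (pvLower fn)) PySem.Dict.empty

theorem pvDedup_append (l : List String) (x : String) :
    PySem.List.dedup (l ++ [x]) =
      if x ∈ l then PySem.List.dedup l else PySem.List.dedup l ++ [x] := by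
  have h1 : PySem.List.dedup (l ++ [x]) = PySem.Set.add (PySem.List.dedup l) x := by
    simp only [PySem.List.dedup_eq_ofList, PySem.Set.ofList_eq_foldl, List.foldl_append]
    rfl
  rw [h1]
  unfold PySem.Set.add
  by_cases h : x ∈ l
  · rw [if_pos, if_pos h]
    exact (PySem.Set.contains_iff _ _).2 (by simp [h])
  · rw [if_neg, if_neg h]
    intro hc
    exact h (by simpa using (PySem.Set.contains_iff _ _).1 hc)

theorem pvBuild_items (l : List String) :
    (pvBuild l).items = (PySem.List.dedup l).map (fun k => (k, pvLower k)) := by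
  induction l using List.reverseRecOn with
  | nil => rfl
  | append_singleton t x ih =>
    have hkeys : (pvBuild t).keys = PySem.List.dedup t := by
      show (pvBuild t).items.map (·.1) = _
      rw [ih, List.map_map]; simp [Function.comp_def]
    have hcontains : (pvBuild t).contains x = decide (x ∈ t) := by
      by_cases h : x ∈ t
      · simp only [h, decide_true]
        exact (PySem.Dict.contains_iff_mem_keys _ _).2 (by rw [hkeys]; exact (PySem.List.mem_dedup _ _).2 h)
      · simp only [h, decide_false]
        cases hc : (pvBuild t).contains x with
        | false => rfl
        | true =>
          exact absurd ((PySem.List.mem_dedup _ _).1 (hkeys ▸ (PySem.Dict.contains_iff_mem_keys _ _).1 hc)) h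
    have hstep : pvBuild (t ++ [x]) = (pvBuild t).insert x (pvLower x) := by
      unfold pvBuild; rw [List.foldl_append]; rfl
    rw [hstep, pvDedup_append]
    by_cases h : x ∈ t
    · have hc : (pvBuild t).contains x = true := by rw [hcontains]; simp [h]
      rw [if_pos h, PySem.Dict.items_insert_of_contains (pvBuild t) (pvLower x) hc, ih,
        List.map_map]
      apply List.map_congr_left
      intro k _
      by_cases hk : k = x
      · simp [hk]
      · simp [hk]
    · have hc : (pvBuild t).contains x = false := by rw [hcontains]; simp [h]
      rw [if_neg h, PySem.Dict.items_insert_of_not_contains (pvBuild t) (pvLower x) hc, ih,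
        List.map_append]
      rfl

theorem pvFind_dedup (p : String → Bool) (l : List String) :
    (PySem.List.dedup l).find? p = l.find? p := by
  induction l using List.reverseRecOn with
  | nil => rfl
  | append_singleton t x ih =>
    rw [pvDedup_append, List.find?_append]
    by_cases h : x ∈ t
    · rw [if_pos h, ih]
      cases hf : t.find? p with
      | some y => simp
      | none =>
        have := List.find?_eq_none.1 hf x h
        simp [List.find?, this]
    · rw [if_neg h, List.find?_append, ih]

-- the items-level scans of A, pushed down to the original fieldname list
theorem pvItems_find (l : List String) (q : String → Bool) :
    (pvBuild l).items.find? (fun p => q p.2) =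
      (l.find? (fun k => q (pvLower k))).map (fun k => (k, pvLower k)) := by
  rw [pvBuild_items, List.find?_map, ← pvFind_dedup (fun k => q (pvLower k)) l]
  rfl

-- A as a chain of five scans over the fieldname list
def pvRa (l : List String) : Option String :=
  match l.find? (fun k => pvLower k == "valor") with
  | some k => some k
  | none =>
  match l.find? (fun k => pvLower k == "valor (r$)") with
  | some k => some k
  | none =>
  match l.find? (fun k => pvLower k == "valor r$") with
  | some k => some k
  | none =>
  match l.find? (fun k => pvLower k == "amount") with
  | some k => some k
  | none =>
  match l.find? (fun k => PySem.Str.isIn "valor" (pvLower k)) with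
  | some k => some k
  | none => none

theorem pvA_eq_Ra (l : List String) (h : l ≠ []) : detect_value_column l = pvRa l := by
  have h0 : (l.foldl (fun d fn => d.insert fn (pvLower fn)) PySem.Dict.empty).items.find?
      (fun p => p.2 == "valor") =
      (l.find? (fun k => pvLower k == "valor")).map (fun k => (k, pvLower k)) :=
    pvItems_find l (fun s => s == "valor")
  have h1 : (l.foldl (fun d fn => d.insert fn (pvLower fn)) PySem.Dict.empty).items.find?
      (fun p => p.2 == "valor (r$)") =
      (l.find? (fun k => pvLower k == "valor (r$)")).map (fun k => (k, pvLower k)) :=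
    pvItems_find l (fun s => s == "valor (r$)")
  have h2 : (l.foldl (fun d fn => d.insert fn (pvLower fn)) PySem.Dict.empty).items.find?
      (fun p => p.2 == "valor r$") =
      (l.find? (fun k => pvLower k == "valor r$")).map (fun k => (k, pvLower k)) :=
    pvItems_find l (fun s => s == "valor r$")
  have h3 : (l.foldl (fun d fn => d.insert fn (pvLower fn)) PySem.Dict.empty).items.find?
      (fun p => p.2 == "amount") =
      (l.find? (fun k => pvLower k == "amount")).map (fun k => (k, pvLower k)) :=
    pvItems_find l (fun s => s == "amount")
  have h4 : (l.foldl (fun d fn => d.insert fn (pvLower fn)) PySem.Dict.empty).items.find?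
      (fun p => PySem.Str.isIn "valor" p.2) =
      (l.find? (fun k => PySem.Str.isIn "valor" (pvLower k))).map (fun k => (k, pvLower k)) :=
    pvItems_find l (fun s => PySem.Str.isIn "valor" s)
  unfold detect_value_column pvRa
  rw [if_neg (by simpa using h)]
  simp only [pvPrefLoop]
  rw [h0, h1, h2, h3, h4]
  cases l.find? (fun k => pvLower k == "valor") with
  | some k => rfl
  | none =>
  cases l.find? (fun k => pvLower k == "valor (r$)") with
  | some k => rfl
  | none =>
  cases l.find? (fun k => pvLower k == "valor r$") with
  | some k => rfl
  | none =>
  cases l.find? (fun k => pvLower k == "amount") with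
  | some k => rfl
  | none =>
  cases l.find? (fun k => PySem.Str.isIn "valor" (pvLower k)) with
  | some k => rfl
  | none => rfl

theorem pvFind_congr {p q : String → Bool} {l : List String}
    (h : ∀ x ∈ l, p x = q x) : l.find? p = l.find? q := by
  induction l with
  | nil => rfl
  | cons y t ih =>
    have hy := h y List.mem_cons_self
    simp only [List.find?, hy]
    cases q y with
    | true => rfl
    | false => exact ih (fun x hx => h x (List.mem_cons_of_mem _ hx))

-- pointwise identification of the exact-match scans with rank tests
theorem pvPred0 (x : String) : (pvLower x == "valor") = (pvRk x == 0) := by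
  rw [pvRk_eq]; by_cases h : pvLower x = "valor" <;> simp [h] <;> split_ifs <;> simp
theorem pvPred1 (x : String) : (pvLower x == "valor (r$)") = (pvRk x == 1) := by
  rw [pvRk_eq]
  by_cases h0 : pvLower x = "valor"
  · simp [h0]
  · by_cases h : pvLower x = "valor (r$)" <;> simp [h0, h] <;> split_ifs <;> simp
theorem pvPred2 (x : String) : (pvLower x == "valor r$") = (pvRk x == 2) := by
  rw [pvRk_eq]
  by_cases h0 : pvLower x = "valor"
  · simp [h0]
  · by_cases h1 : pvLower x = "valor (r$)"
    · simp [h0, h1]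
    · by_cases h : pvLower x = "valor r$" <;> simp [h0, h1, h] <;> split_ifs <;> simp
theorem pvPred3 (x : String) : (pvLower x == "amount") = (pvRk x == 3) := by
  rw [pvRk_eq]
  by_cases h0 : pvLower x = "valor"
  · simp [h0]
  · by_cases h1 : pvLower x = "valor (r$)"
    · simp [h0, h1]
    · by_cases h2 : pvLower x = "valor r$"
      · simp [h0, h1, h2]
      · by_cases h : pvLower x = "amount" <;> simp [h0, h1, h2, h] <;> split_ifs <;> simp

theorem pvRa_char (l : List String) :
    pvRa l = if pvMrk l < 5 then l.find? (fun x => pvRk x == pvMrk l) else none := by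
  have e0 : l.find? (fun k => pvLower k == "valor") = l.find? (fun x => pvRk x == 0) :=
    pvFind_congr (fun x _ => pvPred0 x)
  have e1 : l.find? (fun k => pvLower k == "valor (r$)") = l.find? (fun x => pvRk x == 1) :=
    pvFind_congr (fun x _ => pvPred1 x)
  have e2 : l.find? (fun k => pvLower k == "valor r$") = l.find? (fun x => pvRk x == 2) :=
    pvFind_congr (fun x _ => pvPred2 x)
  have e3 : l.find? (fun k => pvLower k == "amount") = l.find? (fun x => pvRk x == 3) :=
    pvFind_congr (fun x _ => pvPred3 x)
  unfold pvRa
  rw [e0, e1, e2, e3]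
  have hnone : ∀ i : Nat, i < pvMrk l → l.find? (fun x => pvRk x == i) = none := by
    intro i hi
    apply List.find?_eq_none.2
    intro x hx
    have := pvMrk_le_of_mem hx
    simp only [beq_iff_eq]
    omega
  have hsome : pvMrk l < 5 → (l.find? (fun x => pvRk x == pvMrk l)).isSome := by
    intro h5
    rcases pvMrk_mem l with h | ⟨x, hx, hxe⟩
    · omega
    · exact List.find?_isSome.2 ⟨x, hx, by simp [hxe]⟩
  -- the fallback scan coincides with the rank-4 test when no exact match exists
  have hfb : (∀ i : Nat, i ≤ 3 → l.find? (fun x => pvRk x == i) = none) →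
      l.find? (fun x => PySem.Str.isIn "valor" (pvLower x)) = l.find? (fun x => pvRk x == 4) := by
    intro hni
    apply pvFind_congr
    intro x hx
    have h0 := List.find?_eq_none.1 (hni 0 (by omega)) x hx
    have h1 := List.find?_eq_none.1 (hni 1 (by omega)) x hx
    have h2 := List.find?_eq_none.1 (hni 2 (by omega)) x hx
    have h3 := List.find?_eq_none.1 (hni 3 (by omega)) x hx
    simp only [beq_iff_eq] at h0 h1 h2 h3
    have hr := pvRk_eq x
    by_cases hv : PySem.Str.isIn "valor" (pvLower x) = true
    · rw [hr] at *
      split_ifs at * <;> simp_all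
    · rw [hr] at *
      split_ifs at * <;> simp_all
  have hm5 := pvMrk_le l
  have hcases : pvMrk l = 0 ∨ pvMrk l = 1 ∨ pvMrk l = 2 ∨ pvMrk l = 3 ∨ pvMrk l = 4 ∨
      pvMrk l = 5 := by omega
  rcases hcases with hM | hM | hM | hM | hM | hM
  · obtain ⟨y, hy⟩ := Option.isSome_iff_exists.1 (hsome (by omega))
    rw [hM] at hy ⊢
    rw [hy]
    simp
  · obtain ⟨y, hy⟩ := Option.isSome_iff_exists.1 (hsome (by omega))
    rw [hM] at hy ⊢
    rw [hnone 0 (by omega), hy]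
    simp
  · obtain ⟨y, hy⟩ := Option.isSome_iff_exists.1 (hsome (by omega))
    rw [hM] at hy ⊢
    rw [hnone 0 (by omega), hnone 1 (by omega), hy]
    simp
  · obtain ⟨y, hy⟩ := Option.isSome_iff_exists.1 (hsome (by omega))
    rw [hM] at hy ⊢
    rw [hnone 0 (by omega), hnone 1 (by omega), hnone 2 (by omega), hy]
    simp
  · obtain ⟨y, hy⟩ := Option.isSome_iff_exists.1 (hsome (by omega))
    rw [hM] at hy ⊢
    rw [hnone 0 (by omega), hnone 1 (by omega), hnone 2 (by omega), hnone 3 (by omega),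
      hfb (fun i hi => hnone i (by omega)), hy]
    simp
  · rw [hM] at ⊢
    rw [hnone 0 (by omega), hnone 1 (by omega), hnone 2 (by omega), hnone 3 (by omega),
      hfb (fun i hi => hnone i (by omega)),
      List.find?_eq_none.2 (fun x hx => by
        have := pvMrk_le_of_mem hx
        simp only [beq_iff_eq]
        omega)]
    simp

-- ===== VERDICT (by name: the statement is the Claim_ definition above) =====
theorem detect_value_column_spec : Claim_equal_detect_value_column := by
  intro l _
  unfold Spec_detect_value_column
  cases l with
  | nil => rfl
  | cons x t =>
    rw [pvA_eq_Ra _ (by simp), pvRa_char, pvAlt_char]
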